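-- pv_equiv track=rewrite | github.com/LucasNavajas/LoLPredictions | predict.py | calcular_puntajes_tematicos_para_equipo
-- ===== SOURCE A (Python) =====
-- def calcular_puntajes_tematicos_para_equipo(champions_ids, champion_themes):
--
--     # Inicializa el contador de temas para calcular la sinergia
--     theme_counts = {}
--
--     for champ_id in champions_ids:
--         # Obtiene las temáticas para el campeón actual si existen
--         themes = champion_themes.get(str(champ_id), [])
--         for theme in themes:
--             theme_counts[theme] = theme_counts.get(theme, 0) + 1
--
--     # Inicializa el puntaje de sinergia
--     puntaje_sinergia = 0
--
--     for theme, count in theme_counts.items():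
--         if theme in [5, 6]:
--             puntaje_sinergia += count ** 3  # Aumenta el peso de estos temas de manera más significativa
--         else:
--             puntaje_sinergia += max(count - 1, 0)  # Solo suma sinergia si hay más de un campeón con el mismo tema
--
--     return puntaje_sinergia
-- ===== SOURCE B (Python) =====
-- def calcular_puntajes_tematicos_para_equipo(champions_ids, champion_themes):
--     # One pass: count theme-5 and theme-6 occurrences, total other occurrences,
--     # and the set of distinct other themes; sum(max(c-1,0)) = total - distinct.
--     c5 = 0
--     c6 = 0
--     total_other = 0
--     other_seen = set()
--     for champ_id in champions_ids:
--         for theme in champion_themes.get(str(champ_id), []):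
--             if theme == 5:
--                 c5 += 1
--             elif theme == 6:
--                 c6 += 1
--             else:
--                 total_other += 1
--                 other_seen.add(theme)
--     return c5 ** 3 + c6 ** 3 + total_other - len(other_seen)
-- ===== Notes on version B (the rewrite author's own statement) =====
-- stated objective: alternative
-- what changed: Replaces A's two-phase algorithm (build a theme->count dict, then iterate its items summing count**3 or max(count-1,0)) with a single pass that keeps counts of themes 5 and 6, the total number of other theme occurrences and the set of distinct other themes, using the identity sum(max(c-1,0)) = total_other - distinct_other; no count dict and no second iteration phase.
import Mathlib
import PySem

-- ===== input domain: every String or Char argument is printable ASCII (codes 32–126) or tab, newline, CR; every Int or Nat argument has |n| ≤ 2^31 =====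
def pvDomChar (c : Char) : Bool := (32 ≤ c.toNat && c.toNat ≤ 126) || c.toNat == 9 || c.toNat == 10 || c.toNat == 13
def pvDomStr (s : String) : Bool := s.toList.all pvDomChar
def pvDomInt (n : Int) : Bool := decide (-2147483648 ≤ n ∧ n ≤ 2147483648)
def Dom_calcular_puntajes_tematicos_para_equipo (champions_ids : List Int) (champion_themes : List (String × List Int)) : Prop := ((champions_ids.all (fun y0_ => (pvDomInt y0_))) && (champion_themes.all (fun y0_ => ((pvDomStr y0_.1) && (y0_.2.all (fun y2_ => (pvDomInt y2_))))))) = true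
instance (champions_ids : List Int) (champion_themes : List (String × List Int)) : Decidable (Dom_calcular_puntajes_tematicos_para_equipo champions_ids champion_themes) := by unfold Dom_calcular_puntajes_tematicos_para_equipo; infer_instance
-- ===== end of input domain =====

-- B replaces A's two-phase count-dict-then-sum with a single pass keeping c5, c6,
-- total other occurrences and the set of distinct other themes (same result, no dict).

-- ===== PORT A =====
def calcular_puntajes_tematicos_para_equipo (champions_ids : List Int) (champion_themes : List (String × List Int)) : Int :=
  let theme_counts : PySem.Dict Int Int :=
    champions_ids.foldl (fun d champ_id =>
      ((PySem.Dict.mk champion_themes).getD (PySem.Int.toStr champ_id) []).foldl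
        (fun d theme => d.insert theme (d.getD theme 0 + 1)) d) PySem.Dict.empty
  theme_counts.items.foldl (fun s p =>
    if p.1 = 5 ∨ p.1 = 6 then s + p.2 ^ 3 else s + max (p.2 - 1) 0) 0

-- ===== PORT B =====
def calcular_puntajes_tematicos_para_equipo_alt (champions_ids : List Int) (champion_themes : List (String × List Int)) : Int :=
  let st : Int × Int × Int × PySem.Set Int :=
    champions_ids.foldl (fun st champ_id =>
      ((PySem.Dict.mk champion_themes).getD (PySem.Int.toStr champ_id) []).foldl
        (fun st theme =>
          if theme = 5 then (st.1 + 1, st.2.1, st.2.2.1, st.2.2.2)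
          else if theme = 6 then (st.1, st.2.1 + 1, st.2.2.1, st.2.2.2)
          else (st.1, st.2.1, st.2.2.1 + 1, PySem.Set.add st.2.2.2 theme)) st)
      (0, 0, 0, PySem.Set.empty)
  st.1 ^ 3 + st.2.1 ^ 3 + st.2.2.1 - (st.2.2.2.length : Int)

-- ===== PRECONDITION & SPEC =====
def Spec_calcular_puntajes_tematicos_para_equipo (champions_ids : List Int) (champion_themes : List (String × List Int)) (out : Int) : Prop := out = calcular_puntajes_tematicos_para_equipo_alt champions_ids champion_themes
instance (champions_ids : List Int) (champion_themes : List (String × List Int)) (out : Int) : Decidable (Spec_calcular_puntajes_tematicos_para_equipo champions_ids champion_themes out) := by unfold Spec_calcular_puntajes_tematicos_para_equipo; infer_instance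

-- ===== CLAIM (what is proved, stated in full; the proofs are below) =====
def Claim_equal_calcular_puntajes_tematicos_para_equipo : Prop := ∀ (champions_ids : List Int) (champion_themes : List (String × List Int)), Dom_calcular_puntajes_tematicos_para_equipo champions_ids champion_themes → Spec_calcular_puntajes_tematicos_para_equipo champions_ids champion_themes (calcular_puntajes_tematicos_para_equipo champions_ids champion_themes)

-- ===== LEMMAS AND PROOFS =====

-- the per-distinct-theme summand of A's second phase
def pvG (k c : Int) : Int := if k = 5 ∨ k = 6 then c ^ 3 else max (c - 1) 0

-- "theme is neither 5 nor 6"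
def pvQ (t : Int) : Bool := !(t == 5 || t == 6)

-- a nested foldl over looked-up lists is a foldl over the flattened list
theorem pv_foldl_flatMap {σ : Type} (g : Int → List Int) (f : σ → Int → σ) :
    ∀ (ids : List Int) (s : σ),
      ids.foldl (fun s c => (g c).foldl f s) s = (ids.flatMap g).foldl f s := by
  intro ids
  induction ids with
  | nil => intro s; rfl
  | cons c ids ih => intro s; simp [List.foldl_append, ih]

-- one-point update of a sum over a Nodup list
theorem pv_sum_map_single {l : List Int} (hnd : l.Nodup) {f f' : Int → Int} {x : Int}
    (hx : x ∈ l) (h : ∀ k ∈ l, k ≠ x → f k = f' k) :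
    (l.map f).sum = (l.map f').sum + (f x - f' x) := by
  induction l with
  | nil => cases hx
  | cons a l ih =>
    rcases List.nodup_cons.mp hnd with ⟨ha, hnd'⟩
    by_cases hax : a = x
    · subst hax
      have : l.map f = l.map f' := by
        apply List.map_congr_left
        intro k hk
        exact h k (List.mem_cons_of_mem _ hk) (fun e => ha (e ▸ hk))
      simp [this]; ring
    · have hxl : x ∈ l := by
        rcases List.mem_cons.mp hx with h1 | h1
        · exact absurd h1.symm hax
        · exact h1
      have hfa : f a = f' a := h a (List.mem_cons_self) hax
      have := ih hnd' hxl (fun k hk hne => h k (List.mem_cons_of_mem _ hk) hne)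
      simp [this, hfa]; ring

-- counts are unchanged by appending a different element
theorem pv_count_append_ne {L : List Int} {x k : Int} (h : k ≠ x) :
    (L ++ [x]).count k = L.count k := by
  simp [List.count_append, List.count_singleton]
  omega

theorem pv_count_append_self (L : List Int) (x : Int) :
    (L ++ [x]).count x = L.count x + 1 := by
  simp [List.count_append]

-- MAIN IDENTITY: A's sum over distinct themes equals B's closed combination
theorem pv_main (L : List Int) :
    ((PySem.Set.ofList L).map (fun k => pvG k (L.count k))).sum =
      ((L.count 5 : Int)) ^ 3 + ((L.count 6 : Int)) ^ 3
        + ((L.filter pvQ).length : Int) - ((PySem.Set.ofList (L.filter pvQ)).length : Int) := by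
  induction L using List.reverseRecOn with
  | nil => simp [PySem.Set.ofList]
  | append_singleton L x ih =>
    by_cases hx : x ∈ L
    · have hset : PySem.Set.ofList (L ++ [x]) = PySem.Set.ofList L := by
        rw [PySem.Set.ofList_append_singleton,
            PySem.Set.add_of_mem ((PySem.Set.mem_ofList _ _).mpr hx)]
      have hstep :
          ((PySem.Set.ofList L).map (fun k => pvG k (((L ++ [x]).count k : Int)))).sum =
            ((PySem.Set.ofList L).map (fun k => pvG k ((L.count k : Int)))).sum
              + (pvG x (((L ++ [x]).count x : Int)) - pvG x ((L.count x : Int))) := by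
        apply pv_sum_map_single (PySem.Set.nodup_ofList L)
          ((PySem.Set.mem_ofList _ _).mpr hx)
        intro k _ hk
        rw [pv_count_append_ne hk]
      have hc : 0 < L.count x := List.count_pos_iff.mpr hx
      by_cases h5 : x = 5
      · subst h5
        rw [hset, hstep, ih, pv_count_append_self,
            pv_count_append_ne (by norm_num : (6:Int) ≠ 5)]
        have hfq : (L ++ [5]).filter pvQ = L.filter pvQ := by simp [List.filter_append, pvQ]
        rw [hfq]
        simp only [pvG]
        push_cast
        norm_num
        ring
      · by_cases h6 : x = 6
        · subst h6
          rw [hset, hstep, ih, pv_count_append_self,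
              pv_count_append_ne (by norm_num : (5:Int) ≠ 6)]
          have hfq : (L ++ [6]).filter pvQ = L.filter pvQ := by simp [List.filter_append, pvQ]
          rw [hfq]
          simp only [pvG]
          push_cast
          norm_num
          ring
        · have hq : pvQ x = true := by simp [pvQ, h5, h6]
          have hfq : (L ++ [x]).filter pvQ = L.filter pvQ ++ [x] := by
            simp [List.filter_append, hq]
          have hsf : PySem.Set.ofList (L.filter pvQ ++ [x]) = PySem.Set.ofList (L.filter pvQ) := by
            rw [PySem.Set.ofList_append_singleton,
                PySem.Set.add_of_mem ((PySem.Set.mem_ofList _ _).mpr (List.mem_filter.mpr ⟨hx, hq⟩))]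
          rw [hset, hstep, ih, pv_count_append_self, hfq, hsf,
              pv_count_append_ne (Ne.symm h5), pv_count_append_ne (Ne.symm h6)]
          simp only [pvG, if_neg (by tauto : ¬ (x = 5 ∨ x = 6)), List.length_append, List.length_cons, List.length_nil]
          push_cast; omega
    · have hset : PySem.Set.ofList (L ++ [x]) = PySem.Set.ofList L ++ [x] := by
        rw [PySem.Set.ofList_append_singleton,
            PySem.Set.add_of_not_mem (fun h => hx ((PySem.Set.mem_ofList _ _).mp h))]
      have hcongr :
          (PySem.Set.ofList L).map (fun k => pvG k (((L ++ [x]).count k : Int))) =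
            (PySem.Set.ofList L).map (fun k => pvG k ((L.count k : Int))) := by
        apply List.map_congr_left
        intro k hk
        have hkL : k ∈ L := (PySem.Set.mem_ofList _ _).mp hk
        rw [pv_count_append_ne (by rintro rfl; exact hx hkL)]
      have hc0 : L.count x = 0 := List.count_eq_zero_of_not_mem hx
      rw [hset, List.map_append, List.sum_append, hcongr, ih, List.map_singleton,
          List.sum_singleton, pv_count_append_self, hc0]
      by_cases h5 : x = 5
      · subst h5
        rw [pv_count_append_ne (by norm_num : (6:Int) ≠ 5)]
        have hfq : (L ++ [5]).filter pvQ = L.filter pvQ := by simp [List.filter_append, pvQ]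
        rw [hfq]
        simp [pvG, hc0]
        ring
      · by_cases h6 : x = 6
        · subst h6
          rw [pv_count_append_ne (by norm_num : (5:Int) ≠ 6)]
          have hfq : (L ++ [6]).filter pvQ = L.filter pvQ := by simp [List.filter_append, pvQ]
          rw [hfq]
          simp [pvG, hc0]
          ring
        · have hq : pvQ x = true := by simp [pvQ, h5, h6]
          have hfq : (L ++ [x]).filter pvQ = L.filter pvQ ++ [x] := by
            simp [List.filter_append, hq]
          have hxf : x ∉ L.filter pvQ := fun h => hx (List.mem_of_mem_filter h)
          have hsf : PySem.Set.ofList (L.filter pvQ ++ [x]) = PySem.Set.ofList (L.filter pvQ) ++ [x] := by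
            rw [PySem.Set.ofList_append_singleton,
                PySem.Set.add_of_not_mem (fun h => hxf ((PySem.Set.mem_ofList _ _).mp h))]
          rw [hfq, hsf, pv_count_append_ne (Ne.symm h5), pv_count_append_ne (Ne.symm h6)]
          simp only [pvG, if_neg (by tauto : ¬ (x = 5 ∨ x = 6)), List.length_append, List.length_cons, List.length_nil]
          push_cast; omega

-- B's loop state after consuming the flattened theme list
theorem pv_B_state (L : List Int) :
    L.foldl (fun (st : Int × Int × Int × PySem.Set Int) theme =>
        if theme = 5 then (st.1 + 1, st.2.1, st.2.2.1, st.2.2.2)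
        else if theme = 6 then (st.1, st.2.1 + 1, st.2.2.1, st.2.2.2)
        else (st.1, st.2.1, st.2.2.1 + 1, PySem.Set.add st.2.2.2 theme))
      (0, 0, 0, PySem.Set.empty)
    = ((L.count 5 : Int), (L.count 6 : Int), ((L.filter pvQ).length : Int),
       PySem.Set.ofList (L.filter pvQ)) := by
  induction L using List.reverseRecOn with
  | nil => rfl
  | append_singleton L x ih =>
    rw [List.foldl_append, ih]
    simp only [List.foldl_cons, List.foldl_nil]
    by_cases h5 : x = 5
    · subst h5
      have hfq : (L ++ [5]).filter pvQ = L.filter pvQ := by simp [List.filter_append, pvQ]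
      rw [if_pos rfl, pv_count_append_self,
          pv_count_append_ne (by norm_num : (6:Int) ≠ 5), hfq]
      push_cast
      rfl
    · by_cases h6 : x = 6
      · subst h6
        have hfq : (L ++ [6]).filter pvQ = L.filter pvQ := by simp [List.filter_append, pvQ]
        rw [if_neg h5, if_pos rfl, pv_count_append_self,
            pv_count_append_ne (by norm_num : (5:Int) ≠ 6), hfq]
        push_cast
        rfl
      · have hq : pvQ x = true := by simp [pvQ, h5, h6]
        have hfq : (L ++ [x]).filter pvQ = L.filter pvQ ++ [x] := by
          simp [List.filter_append, hq]
        rw [if_neg h5, if_neg h6, pv_count_append_ne (Ne.symm h5),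
            pv_count_append_ne (Ne.symm h6), hfq, PySem.Set.ofList_append_singleton]
        simp [PySem.Set.add, List.length_append]

-- A's second phase is a sum of pvG over the items
theorem pv_foldl_g (l : List (Int × Int)) (a : Int) :
    l.foldl (fun s p => if p.1 = 5 ∨ p.1 = 6 then s + p.2 ^ 3 else s + max (p.2 - 1) 0) a
      = a + (l.map (fun p => pvG p.1 p.2)).sum := by
  induction l generalizing a with
  | nil => simp
  | cons p l ih => simp [ih, pvG]; split_ifs <;> ring

-- ===== VERDICT (by name: the statement is the Claim_ definition above) =====
theorem calcular_puntajes_tematicos_para_equipo_spec : Claim_equal_calcular_puntajes_tematicos_para_equipo := by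
  intro ids ct _
  unfold Spec_calcular_puntajes_tematicos_para_equipo
  unfold calcular_puntajes_tematicos_para_equipo calcular_puntajes_tematicos_para_equipo_alt
  simp only
  rw [pv_foldl_flatMap, pv_foldl_flatMap, PySem.Dict.foldl_insert_getD_add_one_eq_counter,
      pv_foldl_g, PySem.Dict.items_counter, pv_B_state]
  rw [List.map_map, zero_add]
  exact pv_main _
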